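-- pv_equiv track=rewrite | github.com/sohn0356-git/TIL | unknown_source_code/210320/1.py | solution
-- ===== SOURCE A (Python) =====
-- def solution(table, languages, preference):
--     answer = ''
--     tables = {}
--     scores = {}
--     result = []
--     for l in range(len(languages)):
--         scores[languages[l]] = preference[l]
--     for t in table:
--         t = t.split()
--         k = t[0]
--         v = t[1:]
--         d = {}
--         for idx, val in enumerate(v):
--             d[val] = len(v)-idx
--         tables[k] = d
--     for k, v in tables.items():
--         score = 0
--         for ks, vs in scores.items():
--             if v.get(ks):
--                 score += v[ks]*vs
--         result.append((score,k))
--     result = sorted(result, key=lambda x : (-x[0],x[1]))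
--     answer = result[0][1]
--     return answer
-- ===== SOURCE B (Python) =====
-- def solution(table, languages, preference):
--     # Single preference lookup built once; each row is scored in one pass over
--     # its own languages (latest duplicate wins via a reversed scan with a seen
--     # set), and the best name is picked with min instead of sorting.
--     pref = dict(zip(languages, preference))
--     best = {}
--     for row in table:
--         parts = row.split()
--         name = parts[0]
--         seen = set()
--         score = 0
--         for i, lang in enumerate(reversed(parts[1:])):
--             if lang not in seen:
--                 seen.add(lang)
--                 score += (i + 1) * pref.get(lang, 0)
--         best[name] = score
--     return min(best.items(), key=lambda kv: (-kv[1], kv[0]))[0]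
-- ===== Notes on version B (the rewrite author's own statement) =====
-- stated objective: faster
-- what changed: Instead of building a rank dict per table row and scoring it by scanning the whole preference dict, then sorting all (score, name) pairs, B builds one language->preference dict and scores each row in a single reversed pass over the row's own languages with a seen set, picking the winner with min over (-score, name) instead of sorting.
import Mathlib
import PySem

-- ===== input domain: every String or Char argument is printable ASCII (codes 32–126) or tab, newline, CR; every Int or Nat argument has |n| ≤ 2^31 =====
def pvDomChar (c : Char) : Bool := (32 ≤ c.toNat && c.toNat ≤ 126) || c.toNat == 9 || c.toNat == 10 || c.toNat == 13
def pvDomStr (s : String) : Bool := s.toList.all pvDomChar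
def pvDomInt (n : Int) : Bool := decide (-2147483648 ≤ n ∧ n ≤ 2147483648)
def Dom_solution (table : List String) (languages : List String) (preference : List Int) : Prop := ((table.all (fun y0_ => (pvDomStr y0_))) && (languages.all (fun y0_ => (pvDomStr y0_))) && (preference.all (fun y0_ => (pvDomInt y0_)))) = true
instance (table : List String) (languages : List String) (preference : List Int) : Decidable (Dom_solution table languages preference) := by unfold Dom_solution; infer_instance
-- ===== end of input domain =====

-- B replaces A's per-table rank dicts scored against the whole preference dict and the
-- final sort by one scoring pass over each row's own languages plus a single min.

-- ===== PORT A =====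

-- scores[languages[l]] = preference[l] for l in range(len(languages))
def scoresA (languages : List String) (preference : List Int) : PySem.Dict String Int :=
  (PySem.List.pyRange 0 (languages.length : Int) 1).foldl
    (fun d l => d.insert (PySem.List.pyGetD languages l "") (PySem.List.pyGetD preference l 0))
    PySem.Dict.empty

-- d[val] = len(v) - idx for idx, val in enumerate(v)
def ranksA (v : List String) : PySem.Dict String Int :=
  (PySem.List.enumerate v 0).foldl
    (fun d p => d.insert p.2 ((v.length : Int) - p.1)) PySem.Dict.empty

-- the 'for t in table' loop: tables[t[0]] = rank dict of t[1:]
def tablesA (table : List String) : PySem.Dict String (PySem.Dict String Int) :=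
  table.foldl
    (fun tb t =>
      let tw := PySem.Str.split₀ t
      tb.insert (PySem.List.pyGetD tw 0 "")
        (ranksA (PySem.List.slice tw (some 1) none)))
    PySem.Dict.empty

-- score accumulated over scores.items: v[ks]*vs when v.get(ks) is truthy
def scoreA (scores : PySem.Dict String Int) (v : PySem.Dict String Int) : Int :=
  scores.items.foldl
    (fun s p =>
      match v.get? p.1 with
      | some r => if r ≠ 0 then s + r * p.2 else s
      | none => s) 0

def solution (table : List String) (languages : List String) (preference : List Int) : String :=
  let scores := scoresA languages preference
  let result : List (Int × String) :=
    (tablesA table).items.foldl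
      (fun res kv => res ++ [(scoreA scores kv.2, kv.1)]) []
  let sortedRes := PySem.List.sorted2 result (fun x => -x.1) (fun x => x.2)
  (PySem.List.pyGetD sortedRes 0 (0, "")).2

-- ===== PORT B =====

-- score of one row's language list: reversed scan with a seen set, the first
-- (= last in the row) occurrence of each language counts with rank i+1
def rowScoreB (pref : PySem.Dict String Int) (rest : List String) : Int :=
  ((PySem.List.enumerate rest.reverse 0).foldl
    (fun st p =>
      if p.2 ∉ st.1 then (PySem.Set.add st.1 p.2, st.2 + (p.1 + 1) * pref.getD p.2 0)
      else st)
    ((PySem.Set.empty : PySem.Set String), (0 : Int))).2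

def solution_alt (table : List String) (languages : List String) (preference : List Int) : String :=
  let pref := PySem.Dict.ofList (languages.zip preference)
  let best : PySem.Dict String Int :=
    table.foldl
      (fun b row =>
        let parts := PySem.Str.split₀ row
        b.insert (PySem.List.pyGetD parts 0 "")
          (rowScoreB pref (PySem.List.slice parts (some 1) none)))
      PySem.Dict.empty
  match PySem.List.min2? best.items (fun kv => -kv.2) (fun kv => kv.1) with
  | some kv => kv.1
  | none => ""

-- ===== PRECONDITION & SPEC =====

-- Pre_ excludes exactly the inputs where the Python A raises: an empty table and a
-- whitespace-only row (IndexError on t[0] / result[0]), and a languages list longer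
-- than preference (IndexError on preference[l]).
def Pre_solution (table : List String) (languages : List String) (preference : List Int) : Prop :=
  table ≠ [] ∧ (∀ t ∈ table, PySem.Str.split₀ t ≠ []) ∧ languages.length ≤ preference.length
instance (table : List String) (languages : List String) (preference : List Int) : Decidable (Pre_solution table languages preference) := by unfold Pre_solution; infer_instance

def pvWitness_solution : List String × List String × List Int := (["alice py js", "bob js"], ["py", "js"], [3, 1])

def Spec_solution (table : List String) (languages : List String) (preference : List Int) (out : String) : Prop := out = solution_alt table languages preference
instance (table : List String) (languages : List String) (preference : List Int) (out : String) : Decidable (Spec_solution table languages preference out) := by unfold Spec_solution; infer_instance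

-- ===== CLAIM (what is proved, stated in full; the proofs are below) =====
def Claim_equal_solution : Prop := ∀ (table : List String) (languages : List String) (preference : List Int), Dom_solution table languages preference → Pre_solution table languages preference → Spec_solution table languages preference (solution table languages preference)

-- ===== LEMMAS AND PROOFS =====

def drFold (c : Int) (v : List String) : PySem.Dict String Int :=
  (PySem.List.enumerate v 0).foldl (fun d p => d.insert p.2 (c - p.1)) PySem.Dict.empty

lemma drFold_append (c : Int) (v : List String) (x : String) :
    drFold c (v ++ [x]) = (drFold c v).insert x (c - (v.length : Int)) := by
  unfold drFold
  rw [PySem.List.enumerate_append, List.foldl_append]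
  simp [PySem.List.enumerate]

lemma get?_drFold (c : Int) (v : List String) (y : String) :
    (drFold c v).get? y = (PySem.List.index? v.reverse y).map (fun j => c - (v.length : Int) + 1 + (j : Int)) := by
  induction v using List.reverseRecOn with
  | nil => simp [drFold, PySem.List.enumerate, PySem.Dict.get?_empty]
  | append_singleton v x ih =>
    rw [drFold_append, List.reverse_append]
    by_cases hyx : x = y
    · subst hyx
      rw [PySem.Dict.get?_insert_self]
      rw [show ([x].reverse ++ v.reverse : List String) = x :: v.reverse by simp]
      rw [PySem.List.index?_eq_idxOf?]
      simp [List.idxOf?_cons]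
      omega
    · rw [PySem.Dict.get?_insert_of_ne _ _ (fun h => hyx h.symm)]
      rw [ih]
      simp only [List.reverse_singleton, List.singleton_append]
      rw [PySem.List.index?_cons_of_ne _ hyx]
      cases h : PySem.List.index? v.reverse y <;> simp
      ring

def rnk? (v : List String) (y : String) : Option Int :=
  (PySem.List.index? v.reverse y).map (fun j => (j : Int) + 1)

lemma get?_ranksA (v : List String) (y : String) :
    (ranksA v).get? y = rnk? v y := by
  have : ranksA v = drFold (v.length : Int) v := rfl
  rw [this, get?_drFold, rnk?]
  cases h : PySem.List.index? v.reverse y <;> simp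
  omega

lemma rnk?_eq_none (v : List String) (y : String) (h : y ∉ v) : rnk? v y = none := by
  rw [rnk?, (PySem.List.index?_eq_none_iff _ _).mpr (by simpa using h)]
  rfl

lemma rnk?_cons (x : String) (v : List String) (y : String) :
    rnk? (x :: v) y = if y ∈ v then rnk? v y else if y = x then some ((v.length : Int) + 1) else none := by
  rw [rnk?, List.reverse_cons]
  by_cases hm : y ∈ v
  · rw [PySem.List.index?_append_of_mem _ (by simpa using hm), if_pos hm]; rfl
  · rw [if_neg hm]
    by_cases hyx : y = x
    · subst hyx
      rw [PySem.List.index?_append_singleton_self _ _ (by simpa using hm), if_pos rfl]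
      simp
    · rw [if_neg hyx]
      rw [(PySem.List.index?_eq_none_iff _ _).mpr (by simp [hm]; exact hyx)]
      rfl

def rowF (P : PySem.Dict String Int) : List String → Int
  | [] => 0
  | x :: v => rowF P v + (if x ∈ v then 0 else ((v.length : Int) + 1) * P.getD x 0)

def gterm (v : List String) (p : String × Int) : Int :=
  match rnk? v p.1 with
  | some r => if r ≠ 0 then r * p.2 else 0
  | none => 0

lemma foldl_gterm (v : List String) (l : List (String × Int)) (s0 : Int) :
    l.foldl (fun s p =>
      match rnk? v p.1 with
      | some r => if r ≠ 0 then s + r * p.2 else s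
      | none => s) s0 = s0 + (l.map (gterm v)).sum := by
  induction l generalizing s0 with
  | nil => simp
  | cons p l ih =>
    rw [List.foldl_cons, List.map_cons, List.sum_cons, ih]
    unfold gterm
    cases h : rnk? v p.1 with
    | none => ring
    | some r =>
      by_cases hr : r = 0 <;> simp [hr] <;> ring

lemma scoreA_eq_sum (P : PySem.Dict String Int) (v : List String) :
    scoreA P (ranksA v) = (P.items.map (gterm v)).sum := by
  unfold scoreA
  simp only [get?_ranksA]
  rw [foldl_gterm]
  ring

lemma sum_if_key (x : String) (c : Int) (ps : List (String × Int))
    (hnd : (ps.map Prod.fst).Nodup) :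
    (ps.map (fun p => if p.1 = x then c * p.2 else 0)).sum
      = c * (PySem.Dict.mk ps).getD x 0 := by
  induction ps with
  | nil => simp [PySem.Dict.getD_eq_get?_getD, PySem.Dict.get?]
  | cons p ps ih =>
    rw [List.map_cons, List.sum_cons]
    rw [List.map_cons, List.nodup_cons] at hnd
    rw [PySem.Dict.getD_eq_get?_getD, PySem.Dict.get?_mk_cons]
    by_cases hx : p.1 = x
    · subst hx
      simp only [if_pos rfl, beq_self_eq_true, if_pos]
      have hz : (ps.map (fun q => if q.1 = p.1 then c * q.2 else 0)).sum = 0 := by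
        apply List.sum_eq_zero
        intro z hz
        rcases List.mem_map.mp hz with ⟨q, hq, rfl⟩
        have : q.1 ≠ p.1 := fun h => hnd.1 (h ▸ List.mem_map_of_mem hq)
        simp [this]
      rw [hz]; simp
    · rw [if_neg hx, if_neg (by simpa using fun h => hx (by simpa using h))]
      rw [ih hnd.2, PySem.Dict.getD_eq_get?_getD]
      simp

lemma gterm_cons (x : String) (v : List String) (p : String × Int) :
    gterm (x :: v) p = gterm v p
      + (if p.1 = x ∧ x ∉ v then ((v.length : Int) + 1) * p.2 else 0) := by
  unfold gterm
  rw [rnk?_cons]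
  by_cases hm : p.1 ∈ v
  · have : ¬(p.1 = x ∧ x ∉ v) := fun ⟨h1, h2⟩ => h2 (h1 ▸ hm)
    simp [hm, this]
  · rw [if_neg hm]
    by_cases hpx : p.1 = x
    · subst hpx
      simp only [if_pos rfl, rnk?_eq_none v p.1 hm, hm, not_false_iff, and_true]
      have hne : ((v.length : Int) + 1) ≠ 0 := by omega
      simp [hne]
    · simp [hpx, rnk?_eq_none v p.1 hm]

lemma sum_gterm_cons (P : PySem.Dict String Int) (hnd : P.keys.Nodup) (x : String) (v : List String) :
    (P.items.map (gterm (x :: v))).sum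
      = (P.items.map (gterm v)).sum + (if x ∈ v then 0 else ((v.length : Int) + 1) * P.getD x 0) := by
  have h1 : (P.items.map (gterm (x :: v))).sum
      = (P.items.map (gterm v)).sum
        + (P.items.map (fun p => if p.1 = x ∧ x ∉ v then ((v.length : Int) + 1) * p.2 else 0)).sum := by
    rw [← PySem.List.sum_map_add_int]
    congr 1
    exact List.map_congr_left (fun p _ => gterm_cons x v p)
  rw [h1]
  congr 1
  by_cases hm : x ∈ v
  · rw [if_pos hm]
    apply List.sum_eq_zero
    intro z hz
    rcases List.mem_map.mp hz with ⟨q, _, rfl⟩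
    simp [hm]
  · rw [if_neg hm]
    have : (P.items.map (fun p => if p.1 = x ∧ x ∉ v then ((v.length : Int) + 1) * p.2 else 0))
        = (P.items.map (fun p => if p.1 = x then ((v.length : Int) + 1) * p.2 else 0)) := by
      apply List.map_congr_left
      intro p _
      by_cases hpx : p.1 = x <;> simp [hpx, hm]
    rw [this, sum_if_key x _ P.items (by simpa [PySem.Dict.keys] using hnd)]

lemma scoreA_eq_rowF (P : PySem.Dict String Int) (hnd : P.keys.Nodup) (v : List String) :
    scoreA P (ranksA v) = rowF P v := by
  rw [scoreA_eq_sum]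
  induction v with
  | nil =>
    rw [rowF]
    apply List.sum_eq_zero
    intro z hz
    rcases List.mem_map.mp hz with ⟨q, _, rfl⟩
    simp [gterm, rnk?]
  | cons x v ih =>
    rw [sum_gterm_cons P hnd, ih, rowF]

lemma mem_fst_seenFold (P : PySem.Dict String Int) (ps : List (Int × String))
    (st : PySem.Set String × Int) (y : String) :
    y ∈ (ps.foldl
      (fun st p =>
        if p.2 ∉ st.1 then (PySem.Set.add st.1 p.2, st.2 + (p.1 + 1) * P.getD p.2 0)
        else st) st).1 ↔ y ∈ st.1 ∨ y ∈ ps.map (·.2) := by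
  induction ps generalizing st with
  | nil => simp
  | cons p ps ih =>
    rw [List.foldl_cons, ih]
    by_cases hp : p.2 ∈ st.1
    · simp only [hp, not_true, if_neg, List.map_cons, List.mem_cons]
      constructor
      · rintro (h | h)
        · exact Or.inl h
        · exact Or.inr (Or.inr h)
      · rintro (h | rfl | h)
        · exact Or.inl h
        · exact Or.inl hp
        · exact Or.inr h
    · simp only [hp, not_false_iff, if_pos, List.map_cons, List.mem_cons]
      rw [PySem.Set.mem_add]
      tauto

lemma rowScoreB_eq_rowF (P : PySem.Dict String Int) (v : List String) :
    rowScoreB P v = rowF P v := by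
  induction v with
  | nil => rfl
  | cons x v ih =>
    unfold rowScoreB
    rw [List.reverse_cons, PySem.List.enumerate_append, List.foldl_append]
    have hsingle : ∀ (s : Int), PySem.List.enumerate [x] s = [(s, x)] := by
      intro s; rfl
    rw [hsingle, List.foldl_cons, List.foldl_nil]
    set st := ((PySem.List.enumerate v.reverse 0).foldl
      (fun st p =>
        if p.2 ∉ st.1 then (PySem.Set.add st.1 p.2, st.2 + (p.1 + 1) * P.getD p.2 0)
        else st)
      ((PySem.Set.empty : PySem.Set String), (0 : Int))) with hst
    have hmem : x ∈ st.1 ↔ x ∈ v := by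
      rw [hst, mem_fst_seenFold]
      simp [PySem.List.map_snd_enumerate, PySem.Set.empty]
    have hsc : st.2 = rowF P v := by rw [hst]; exact ih
    rw [rowF]
    by_cases hx : x ∈ v
    · rw [if_neg (by simp [hmem.mpr hx]), if_pos hx, hsc]
      ring
    · rw [if_pos (by simp [hmem, hx]), if_neg hx, hsc]
      simp

lemma scores_fold_take (languages : List String) (preference : List Int) (n : Nat)
    (h1 : n ≤ languages.length) (h2 : n ≤ preference.length) :
    (PySem.List.pyRange 0 (n : Int) 1).foldl
      (fun d l => d.insert (PySem.List.pyGetD languages l "") (PySem.List.pyGetD preference l 0))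
      PySem.Dict.empty
    = ((languages.zip preference).take n).foldl (fun d p => d.insert p.1 p.2) PySem.Dict.empty := by
  induction n with
  | zero => simp [PySem.List.pyRange_one_eq_nil]
  | succ n ih =>
    have hn1 : n ≤ languages.length := by omega
    have hn2 : n ≤ preference.length := by omega
    have hcast : ((n + 1 : Nat) : Int) = (n : Int) + 1 := by push_cast; ring
    rw [hcast, PySem.List.pyRange_one_succ_right (by positivity), List.foldl_append,
      ih hn1 hn2]
    have hlt : n < (languages.zip preference).length := by
      rw [List.length_zip]; omega
    rw [List.take_succ, List.foldl_append,
      List.getElem?_eq_getElem hlt]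
    simp only [Option.toList_some, List.foldl_cons, List.foldl_nil]
    rw [List.getElem_zip]
    simp only [PySem.List.pyGetD_natCast, List.getD]
    congr 1
    · rw [List.getElem?_eq_getElem (by omega : n < languages.length)]; rfl
    · rw [List.getElem?_eq_getElem (by omega : n < preference.length)]; rfl

lemma scores_eq_pref (languages : List String) (preference : List Int)
    (hlen : languages.length ≤ preference.length) :
    scoresA languages preference = PySem.Dict.ofList (languages.zip preference) := by
  unfold scoresA
  rw [scores_fold_take languages preference languages.length le_rfl hlen]
  rw [List.take_of_length_le (by rw [List.length_zip]; omega)]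
  rfl

lemma nodup_keys_scoresA (languages : List String) (preference : List Int) :
    (scoresA languages preference).keys.Nodup := by
  unfold scoresA
  apply PySem.Dict.nodup_keys_foldl_insert_key _ (fun l => PySem.List.pyGetD languages l "")
    (fun d l => PySem.List.pyGetD preference l 0)
  simp [PySem.Dict.keys_empty]

lemma items_insert_map {ν₁ ν₂ : Type} (φ : ν₁ → ν₂)
    (tb : PySem.Dict String ν₁) (b : PySem.Dict String ν₂)
    (h : b.items = tb.items.map (fun p => (p.1, φ p.2))) (k : String) (dv : ν₁) :
    (b.insert k (φ dv)).items = ((tb.insert k dv).items).map (fun p => (p.1, φ p.2)) := by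
  have hkeys : b.keys = tb.keys := by
    simp only [PySem.Dict.keys, h, List.map_map]
    rfl
  have hcont : b.contains k = tb.contains k := by
    rw [PySem.Dict.contains_eq_decide_mem_keys, PySem.Dict.contains_eq_decide_mem_keys, hkeys]
  rw [PySem.Dict.items_insert, PySem.Dict.items_insert, hcont]
  by_cases hc : tb.contains k
  · rw [if_pos hc, if_pos hc, h, List.map_map, List.map_map]
    apply List.map_congr_left
    intro p _
    by_cases hpk : p.1 = k <;> simp [hpk]
  · rw [if_neg hc, if_neg hc, h, List.map_append]
    rfl

lemma fold_insert_items_map {ν₁ ν₂ : Type} (φ : ν₁ → ν₂)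
    (key : String → String) (val : String → ν₁) (rows : List String) :
    ∀ (tb : PySem.Dict String ν₁) (b : PySem.Dict String ν₂),
    b.items = tb.items.map (fun p => (p.1, φ p.2)) →
    (rows.foldl (fun b row => b.insert (key row) (φ (val row))) b).items
      = (rows.foldl (fun tb row => tb.insert (key row) (val row)) tb).items.map (fun p => (p.1, φ p.2)) := by
  induction rows with
  | nil => intro tb b h; simpa using h
  | cons r rows ih =>
    intro tb b h
    rw [List.foldl_cons, List.foldl_cons]
    exact ih _ _ (items_insert_map φ tb b h (key r) (val r))

lemma items_insert_ne_nil {κ ν : Type} [BEq κ] [LawfulBEq κ] (d : PySem.Dict κ ν) (k : κ) (v : ν) :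
    (d.insert k v).items ≠ [] := by
  rw [PySem.Dict.items_insert]
  by_cases hc : d.contains k
  · rw [if_pos hc]
    intro hnil
    rw [List.map_eq_nil_iff] at hnil
    have : d.keys = [] := by simp [PySem.Dict.keys, hnil]
    rw [PySem.Dict.contains_iff_mem_keys, this] at hc
    simp at hc
  · rw [if_neg hc]
    simp

lemma fold_insert_items_ne_nil {ν : Type} (key : String → String) (val : String → ν)
    (rows : List String) :
    ∀ (tb : PySem.Dict String ν), tb.items ≠ [] →
    (rows.foldl (fun tb row => tb.insert (key row) (val row)) tb).items ≠ [] := by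
  induction rows with
  | nil => intro tb h; simpa using h
  | cons r rows ih =>
    intro tb h
    rw [List.foldl_cons]
    exact ih _ (items_insert_ne_nil _ _ _)

lemma head?_insertBy {α : Type} (before : α → α → Bool) (x : α) (ys : List α) :
    (PySem.List.insertBy before x ys).head?
      = some (match ys.head? with
              | none => x
              | some y => if before x y then x else y) := by
  cases ys with
  | nil => rfl
  | cons y ys =>
    show (if before x y then x :: y :: ys else y :: PySem.List.insertBy before x ys).head? = _
    by_cases h : before x y <;> simp [h]

lemma head?_foldl_insertBy {α : Type} (before : α → α → Bool) (xs : List α) :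
    ∀ (acc : List α),
    (xs.foldl (fun a x => PySem.List.insertBy before x a) acc).head?
      = xs.foldl (fun o x =>
          match o with
          | none => some x
          | some m => if before x m then some x else some m) acc.head? := by
  induction xs with
  | nil => intro acc; rfl
  | cons x xs ih =>
    intro acc
    rw [List.foldl_cons, List.foldl_cons, ih, head?_insertBy]
    cases acc with
    | nil => rfl
    | cons y ys =>
      simp only [List.head?_cons]
      by_cases h : before x y <;> simp [h]

lemma head?_sorted2 {α κ₁ κ₂ : Type} [LinearOrder κ₁] [LinearOrder κ₂]
    (xs : List α) (k1 : α → κ₁) (k2 : α → κ₂) :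
    (PySem.List.sorted2 xs k1 k2 false).head? = PySem.List.min2? xs k1 k2 := by
  show ((List.foldl (fun acc x => PySem.List.insertBy _ x acc) [] xs).head?) = _
  rw [head?_foldl_insertBy]
  rfl

lemma min2?_map {α β κ₁ κ₂ : Type} [LinearOrder κ₁] [LinearOrder κ₂]
    (f : β → α) (l : List β) (k1 : α → κ₁) (k2 : α → κ₂) :
    PySem.List.min2? (l.map f) k1 k2
      = (PySem.List.min2? l (fun b => k1 (f b)) (fun b => k2 (f b))).map f := by
  unfold PySem.List.min2?
  rw [List.foldl_map]
  have : ∀ (acc : Option β),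
      l.foldl (fun acc b =>
        match acc with
        | none => some (f b)
        | some m => if (decide (k1 (f b) < k1 m) || !decide (k1 m < k1 (f b)) && decide (k2 (f b) < k2 m)) = true then some (f b) else some m) (acc.map f)
      = (l.foldl (fun acc b =>
        match acc with
        | none => some b
        | some m => if (decide (k1 (f b) < k1 (f m)) || !decide (k1 (f m) < k1 (f b)) && decide (k2 (f b) < k2 (f m))) = true then some b else some m) acc).map f := by
    induction l with
    | nil => intro acc; rfl
    | cons b l ih =>
      intro acc
      rw [List.foldl_cons, List.foldl_cons]
      cases acc with
      | none => exact ih (some b)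
      | some m =>
        simp only [Option.map_some]
        by_cases h : (decide (k1 (f b) < k1 (f m)) || !decide (k1 (f m) < k1 (f b)) && decide (k2 (f b) < k2 (f m))) = true
        · rw [if_pos h, if_pos h]; exact ih (some b)
        · rw [if_neg h, if_neg h]; exact ih (some m)
  exact this none

lemma min2?_isSome {α κ₁ κ₂ : Type} [LinearOrder κ₁] [LinearOrder κ₂]
    (l : List α) (k1 : α → κ₁) (k2 : α → κ₂) (h : l ≠ []) :
    ∃ m, PySem.List.min2? l k1 k2 = some m := by
  unfold PySem.List.min2?
  have : ∀ (l' : List α) (m : α),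
      ∃ m', l'.foldl (fun acc x =>
        match acc with
        | none => some x
        | some m => if (decide (k1 x < k1 m) || !decide (k1 m < k1 x) && decide (k2 x < k2 m)) = true then some x else some m) (some m) = some m' := by
    intro l'
    induction l' with
    | nil => intro m; exact ⟨m, rfl⟩
    | cons x l' ih =>
      intro m
      by_cases h : (decide (k1 x < k1 m) || !decide (k1 m < k1 x) && decide (k2 x < k2 m)) = true
      · simpa only [List.foldl_cons, h, if_true] using ih x
      · simpa only [List.foldl_cons, h, if_false, Bool.false_eq_true] using ih m
  cases l with
  | nil => exact absurd rfl h
  | cons x l => rw [List.foldl_cons]; exact this l x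

lemma solution_spec_main (table : List String) (languages : List String) (preference : List Int)
    (htab : table ≠ []) (hlen : languages.length ≤ preference.length) :
    solution table languages preference = solution_alt table languages preference := by
  have hpref := scores_eq_pref languages preference hlen
  set P := scoresA languages preference with hP
  show (PySem.List.pyGetD
      (PySem.List.sorted2
        ((tablesA table).items.foldl (fun res kv => res ++ [(scoreA P kv.2, kv.1)]) [])
        (fun x => -x.1) (fun x => x.2)) 0 (0, "")).2
    = (match PySem.List.min2?
        (table.foldl
          (fun b row =>
            b.insert (PySem.List.pyGetD (PySem.Str.split₀ row) 0 "")
              (rowScoreB (PySem.Dict.ofList (languages.zip preference))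
                (PySem.List.slice (PySem.Str.split₀ row) (some 1) none)))
          PySem.Dict.empty).items
        (fun kv => -kv.2) (fun kv => kv.1) with
      | some kv => kv.1
      | none => "")
  rw [← hpref]
  have hnd : P.keys.Nodup := nodup_keys_scoresA languages preference
  -- B's best dict as A's tables dict with each rank dict scored
  have hrow : ∀ rest : List String, rowScoreB P rest = scoreA P (ranksA rest) := by
    intro rest
    rw [rowScoreB_eq_rowF, scoreA_eq_rowF P hnd]
  have hbest :
      (table.foldl
        (fun b row =>
          b.insert (PySem.List.pyGetD (PySem.Str.split₀ row) 0 "")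
            (rowScoreB P (PySem.List.slice (PySem.Str.split₀ row) (some 1) none)))
        PySem.Dict.empty).items
      = (tablesA table).items.map (fun p => (p.1, scoreA P p.2)) := by
    have hfun : (fun (b : PySem.Dict String Int) row =>
        b.insert (PySem.List.pyGetD (PySem.Str.split₀ row) 0 "")
          (rowScoreB P (PySem.List.slice (PySem.Str.split₀ row) (some 1) none)))
        = (fun b row =>
        b.insert (PySem.List.pyGetD (PySem.Str.split₀ row) 0 "")
          ((fun d => scoreA P d) (ranksA (PySem.List.slice (PySem.Str.split₀ row) (some 1) none)))) := by
      funext b row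
      rw [hrow]
    rw [hfun]
    exact fold_insert_items_map (fun d => scoreA P d)
      (fun row => PySem.List.pyGetD (PySem.Str.split₀ row) 0 "")
      (fun row => ranksA (PySem.List.slice (PySem.Str.split₀ row) (some 1) none))
      table PySem.Dict.empty PySem.Dict.empty rfl
  -- A's result list is the map of B's best items under the pair swap
  have hresult :
      (tablesA table).items.foldl (fun res kv => res ++ [(scoreA P kv.2, kv.1)]) []
        = ((tablesA table).items.map (fun p => (p.1, scoreA P p.2))).map (fun q => (q.2, q.1)) := by
    rw [PySem.List.foldl_append_singleton_eq_map, List.map_map]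
    simp
  rw [hresult, ← hbest]
  set L := (table.foldl
      (fun b row =>
        b.insert (PySem.List.pyGetD (PySem.Str.split₀ row) 0 "")
          (rowScoreB P (PySem.List.slice (PySem.Str.split₀ row) (some 1) none)))
      PySem.Dict.empty).items with hLdef
  have hLne : L ≠ [] := by
    rw [hLdef]
    cases table with
    | nil => exact absurd rfl htab
    | cons t rest =>
      rw [List.foldl_cons]
      exact fold_insert_items_ne_nil _ _ rest _ (items_insert_ne_nil _ _ _)
  obtain ⟨bkv, hbkv⟩ := min2?_isSome L (fun kv => -kv.2) (fun kv => kv.1) hLne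
  have hmin : PySem.List.min2? (L.map (fun q => (q.2, q.1))) (fun x : Int × String => -x.1) (fun x => x.2)
      = some (bkv.2, bkv.1) := by
    rw [min2?_map]
    simp only []
    rw [hbkv]
    rfl
  have hhead : (PySem.List.sorted2 (L.map (fun q => (q.2, q.1))) (fun x : Int × String => -x.1) (fun x => x.2) false).head? = some (bkv.2, bkv.1) := by
    rw [head?_sorted2, hmin]
  cases hs : PySem.List.sorted2 (L.map (fun q => (q.2, q.1))) (fun x : Int × String => -x.1) (fun x => x.2) false with
  | nil => rw [hs] at hhead; simp at hhead
  | cons c tl =>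
    rw [hs] at hhead
    simp only [List.head?_cons, Option.some_inj] at hhead
    rw [hbkv]
    have hget : PySem.List.pyGetD (c :: tl) 0 ((0 : Int), "") = c := by
      simpa using PySem.List.pyGetD_natCast (c :: tl) 0 ((0 : Int), "")
    rw [hget, hhead]

-- ===== VERDICT (by name: the statement is the Claim_ definition above) =====
theorem solution_spec : Claim_equal_solution := by
  intro table languages preference _ hpre
  unfold Spec_solution
  exact solution_spec_main table languages preference hpre.1 hpre.2.2
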